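-- pv_equiv track=rewrite | github.com/law826/radiology_diagnoser | question_generator/question_generator_old.py | verb_split
-- ===== SOURCE A (Python) =====
-- import string
--
-- def verb_split(tagged):
--     """
--     Simple splitting of sentence based on first verb found.
--     """
--     try:
--         first_verb_index = next(i for i, pair in enumerate(tagged) if (pair[1] == 'VBZ' or pair[1] == 'VBP'))
--         first_verb_index
--         question_list = [pair[0] for pair in tagged[:first_verb_index+1]]
--         question_list.append('what?')
--         question_string = ''.join([('' if c in string.punctuation else ' ')+c for c in question_list]).strip()
--         answer_list = [pair[0] for pair in tagged[first_verb_index+1:]]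
--         answer_string = ''.join([('' if c in string.punctuation else ' ')+c for c in answer_list]).strip()
--         return question_string, answer_string
--     except:
--         pass
-- ===== SOURCE B (Python) =====
-- import string
--
--
-- def _fmt(words):
--     out = []
--     for w in words:
--         out.append(('' if w in string.punctuation else ' ') + w)
--     return ''.join(out).strip()
--
--
-- def verb_split(tagged):
--     """
--     Single pass: collect words into the question until the first
--     VBZ/VBP tag (inclusive), everything after into the answer.
--     """
--     question, answer = [], []
--     found = False
--     for word, tag in tagged:
--         if found:
--             answer.append(word)
--         elif tag == 'VBZ' or tag == 'VBP':
--             found = True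
--             question.append(word)
--             question.append('what?')
--         else:
--             question.append(word)
--     if not found:
--         return None
--     return _fmt(question), _fmt(answer)
-- ===== Notes on version B (the rewrite author's own statement) =====
-- stated objective: simpler
-- what changed: Replaces A's enumerate-based index search followed by two slice comprehensions with one linear pass that partitions words into question/answer around the first VBZ/VBP tag, with the punctuation-aware join factored into a shared helper.
import Mathlib
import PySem

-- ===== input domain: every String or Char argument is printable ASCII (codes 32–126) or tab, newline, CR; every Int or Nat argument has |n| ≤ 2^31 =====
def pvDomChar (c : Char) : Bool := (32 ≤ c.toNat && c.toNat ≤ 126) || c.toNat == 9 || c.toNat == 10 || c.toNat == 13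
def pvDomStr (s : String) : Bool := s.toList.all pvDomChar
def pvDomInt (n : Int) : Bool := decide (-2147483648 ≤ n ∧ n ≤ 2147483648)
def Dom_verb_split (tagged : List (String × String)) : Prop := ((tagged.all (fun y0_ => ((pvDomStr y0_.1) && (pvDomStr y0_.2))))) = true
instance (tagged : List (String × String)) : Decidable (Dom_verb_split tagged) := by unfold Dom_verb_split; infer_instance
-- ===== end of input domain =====

-- B is a single linear pass with a found-flag instead of A's index search plus two slices; objective: simpler decomposition, same cost.

-- string.punctuation
def pvPunct : String := "!\"#$%&'()*+,-./:;<=>?@[\\]^_`{|}~"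

-- ===== PORT A =====
-- next(i for i, pair in enumerate(tagged) if pair[1] == 'VBZ' or pair[1] == 'VBP'); none = StopIteration
def findFirstVerb : List (String × String) → Nat → Option Nat
  | [], _ => none
  | pair :: rest, i =>
      if pair.2 = "VBZ" ∨ pair.2 = "VBP" then some i else findFirstVerb rest (i + 1)

-- ''.join([('' if c in string.punctuation else ' ')+c for c in ws]).strip()
def fmtA (ws : List String) : String :=
  PySem.Str.strip (PySem.Str.join ""
    (ws.map (fun c => (if PySem.Str.isIn c pvPunct then "" else " ") ++ c)))

def verb_split (tagged : List (String × String)) : Option (String × String) :=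
  match findFirstVerb tagged 0 with
  | none => none   -- StopIteration caught by the bare except: returns None
  | some first_verb_index =>
      let question_list :=
        (PySem.List.slice tagged none (some ((first_verb_index : Int) + 1))).map
          (fun pair => pair.1) ++ ["what?"]
      let question_string := fmtA question_list
      let answer_list :=
        (PySem.List.slice tagged (some ((first_verb_index : Int) + 1)) none).map
          (fun pair => pair.1)
      let answer_string := fmtA answer_list
      some (question_string, answer_string)

-- ===== PORT B =====
-- _fmt: explicit loop appending the prefixed words, then ''.join(...).strip()
def fmtB (ws : List String) : String :=
  PySem.Str.strip (PySem.Str.join ""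
    (ws.foldl (fun out w => out ++ [(if PySem.Str.isIn w pvPunct then "" else " ") ++ w]) []))

-- the loop iterations after 'found' becomes True: answer.append(word)
def collectAnswer : List (String × String) → List String → List String
  | [], answer => answer
  | (word, _) :: rest, answer => collectAnswer rest (answer ++ [word])

-- the loop before 'found': build question; on the first VBZ/VBP flip to collecting the answer
def vsLoop : List (String × String) → List String → Option (List String × List String)
  | [], _ => none   -- not found: return None
  | (word, tag) :: rest, question =>
      if tag = "VBZ" ∨ tag = "VBP" then
        some (question ++ [word] ++ ["what?"], collectAnswer rest [])
      else
        vsLoop rest (question ++ [word])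

def verb_split_alt (tagged : List (String × String)) : Option (String × String) :=
  match vsLoop tagged [] with
  | none => none
  | some (question, answer) => some (fmtB question, fmtB answer)

-- ===== PRECONDITION & SPEC =====
def Spec_verb_split (tagged : List (String × String)) (out : Option (String × String)) : Prop := out = verb_split_alt tagged
instance (tagged : List (String × String)) (out : Option (String × String)) : Decidable (Spec_verb_split tagged out) := by unfold Spec_verb_split; infer_instance

-- ===== CLAIM (what is proved, stated in full; the proofs are below) =====
def Claim_equal_verb_split : Prop := ∀ (tagged : List (String × String)), Dom_verb_split tagged → Spec_verb_split tagged (verb_split tagged)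

-- ===== LEMMAS AND PROOFS =====

theorem fmtB_eq_fmtA (ws : List String) : fmtB ws = fmtA ws := by
  unfold fmtB fmtA
  congr 2
  suffices h : ∀ (acc : List String),
      ws.foldl (fun out w => out ++ [(if PySem.Str.isIn w pvPunct then "" else " ") ++ w]) acc
        = acc ++ ws.map (fun c => (if PySem.Str.isIn c pvPunct then "" else " ") ++ c) by
    simpa using h []
  induction ws with
  | nil => simp
  | cons w rest ih =>
    intro acc
    rw [List.foldl_cons, ih]
    simp

theorem collectAnswer_eq (l : List (String × String)) :
    ∀ acc, collectAnswer l acc = acc ++ l.map Prod.fst := by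
  induction l with
  | nil => simp [collectAnswer]
  | cons p rest ih => intro acc; cases p; simp [collectAnswer, ih]

theorem findFirstVerb_shift (l : List (String × String)) :
    ∀ n, findFirstVerb l n = (findFirstVerb l 0).map (· + n) := by
  induction l with
  | nil => intro n; rfl
  | cons p rest ih =>
    intro n
    by_cases h : p.2 = "VBZ" ∨ p.2 = "VBP"
    · simp [findFirstVerb, h]
    · simp only [findFirstVerb, if_neg h]
      rw [ih (n + 1), ih 1, Option.map_map]
      congr 1
      funext i
      simp
      omega

theorem vsLoop_eq (tagged : List (String × String)) :
    ∀ q, vsLoop tagged q = (findFirstVerb tagged 0).map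
      (fun i => (q ++ (tagged.take (i + 1)).map Prod.fst ++ ["what?"],
                 (tagged.drop (i + 1)).map Prod.fst)) := by
  induction tagged with
  | nil => intro q; rfl
  | cons p rest ih =>
    intro q
    obtain ⟨word, tag⟩ := p
    by_cases h : tag = "VBZ" ∨ tag = "VBP"
    · simp [vsLoop, findFirstVerb, h, collectAnswer_eq]
    · simp only [vsLoop, findFirstVerb, if_neg h]
      rw [ih (q ++ [word]), findFirstVerb_shift rest 1]
      rw [Option.map_map]
      congr 1
      funext i
      simp [List.take_succ_cons]

theorem verb_split_spec' (tagged : List (String × String)) :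
    verb_split tagged = verb_split_alt tagged := by
  unfold verb_split verb_split_alt
  rw [vsLoop_eq tagged []]
  cases hf : findFirstVerb tagged 0 with
  | none => rfl
  | some i =>
    simp only [Option.map_some]
    have hto : PySem.List.slice tagged none (some ((i : Int) + 1)) = tagged.take (i + 1) := by
      have : ((i : Int) + 1) = ((i + 1 : Nat) : Int) := by push_cast; ring
      rw [this, PySem.List.slice_to_natCast]
    have hfrom : PySem.List.slice tagged (some ((i : Int) + 1)) none = tagged.drop (i + 1) := by
      have : ((i : Int) + 1) = ((i + 1 : Nat) : Int) := by push_cast; ring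
      rw [this, PySem.List.slice_from_natCast]
    simp [hto, hfrom, fmtB_eq_fmtA]

-- ===== VERDICT (by name: the statement is the Claim_ definition above) =====
theorem verb_split_spec : Claim_equal_verb_split := by
  intro tagged _
  exact verb_split_spec' tagged
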